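-- pv_equiv track=rewrite | github.com/cashubtc/nutshell | cashu/mint/sqlite_to_postgres.py | _ordered_tables
-- ===== SOURCE A (Python) =====
-- from typing import Any, Dict, Iterable, List, Optional, Tuple
--
-- def _ordered_tables(existing: Dict[str, str]) -> List[str]:
--     desired_order = [
--         "keysets",
--         "mint_pubkeys",
--         "mint_quotes",
--         "melt_quotes",
--         "promises",
--         "proofs_used",
--         "proofs_pending",
--         "balance_log",
--     ]
--     # Filter desired order by presence
--     present_ordered = [
--         t for t in desired_order if t in existing and existing[t] == "table"
--     ]
--     # Append any other base tables not covered yet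
--     rest = [
--         t
--         for t, typ in existing.items()
--         if typ == "table" and t not in present_ordered and t not in {"dbversions"}
--     ]
--     return present_ordered + rest
-- ===== SOURCE B (Python) =====
-- def _ordered_tables(existing):
--     desired_order = [
--         "keysets",
--         "mint_pubkeys",
--         "mint_quotes",
--         "melt_quotes",
--         "promises",
--         "proofs_used",
--         "proofs_pending",
--         "balance_log",
--     ]
--     rank = {name: i for i, name in enumerate(desired_order)}
--     n = len(desired_order)
--     # one pass: drop each eligible table into its priority bucket (bucket n = the rest)
--     buckets = [[] for _ in range(n + 1)]
--     for t, typ in existing.items():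
--         if typ == "table" and t != "dbversions":
--             buckets[rank.get(t, n)].append(t)
--     out = []
--     for b in buckets:
--         out += b
--     return out
-- ===== Notes on version B (the rewrite author's own statement) =====
-- stated objective: alternative
-- what changed: Replaces A's two filter passes (desired-order filter with dict lookups, then a rest pass with a membership test against present_ordered) by a rank dict plus a single bucket-distribution pass over the items, flattening the buckets at the end.
import Mathlib
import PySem

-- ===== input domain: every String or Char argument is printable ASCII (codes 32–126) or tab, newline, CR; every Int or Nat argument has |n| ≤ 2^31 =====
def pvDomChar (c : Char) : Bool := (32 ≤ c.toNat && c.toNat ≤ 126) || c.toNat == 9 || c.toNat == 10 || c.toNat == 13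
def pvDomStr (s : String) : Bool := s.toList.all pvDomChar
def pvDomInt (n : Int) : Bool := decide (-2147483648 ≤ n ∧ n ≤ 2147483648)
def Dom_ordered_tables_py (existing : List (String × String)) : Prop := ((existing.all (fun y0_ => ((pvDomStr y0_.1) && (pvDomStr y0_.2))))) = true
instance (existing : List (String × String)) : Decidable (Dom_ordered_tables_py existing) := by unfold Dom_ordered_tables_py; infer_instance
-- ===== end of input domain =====

-- B replaces A's two filter passes by a rank dict and a single bucket-distribution pass (alternative
-- decomposition, same cost). The dict argument is modelled per the convention as an association list,
-- normalised with PySem.Dict.ofList (Python dict semantics: first position, last value).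

-- ===== PORT A =====
def ordered_tables_py (existing : List (String × String)) : List String :=
  let d := PySem.Dict.ofList existing
  let desired_order : List String :=
    ["keysets", "mint_pubkeys", "mint_quotes", "melt_quotes",
     "promises", "proofs_used", "proofs_pending", "balance_log"]
  let present_ordered :=
    desired_order.filter (fun t => d.contains t && (d.get? t == some "table"))
  let rest :=
    (d.items.filter (fun p =>
      p.2 == "table" && !(present_ordered.contains p.1) && !(p.1 == "dbversions"))).map (fun p => p.1)
  present_ordered ++ rest

-- ===== PORT B =====
def ordered_tables_py_alt (existing : List (String × String)) : List String :=
  let desired_order : List String :=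
    ["keysets", "mint_pubkeys", "mint_quotes", "melt_quotes",
     "promises", "proofs_used", "proofs_pending", "balance_log"]
  let rank : PySem.Dict String Int :=
    PySem.Dict.ofList ((PySem.List.enumerate desired_order).map (fun p => (p.2, p.1)))
  let n : Int := desired_order.length
  let buckets0 : List (List String) := (PySem.List.pyRange 0 (n + 1) 1).map (fun _ => [])
  let buckets := (PySem.Dict.ofList existing).items.foldl
    (fun bs p =>
      if p.2 == "table" && !(p.1 == "dbversions") then
        PySem.List.pySetD bs (rank.getD p.1 n) (PySem.List.pyGetD bs (rank.getD p.1 n) [] ++ [p.1])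
      else bs) buckets0
  buckets.foldl (fun o b => o ++ b) []

-- ===== PRECONDITION & SPEC =====
def Spec_ordered_tables_py (existing : List (String × String)) (out : List String) : Prop := out = ordered_tables_py_alt existing
instance (existing : List (String × String)) (out : List String) : Decidable (Spec_ordered_tables_py existing out) := by unfold Spec_ordered_tables_py; infer_instance

-- ===== CLAIM (what is proved, stated in full; the proofs are below) =====
def Claim_equal_ordered_tables_py : Prop := ∀ (existing : List (String × String)), Dom_ordered_tables_py existing → Spec_ordered_tables_py existing (ordered_tables_py existing)

-- ===== LEMMAS AND PROOFS =====

def pvNames : List String := ["keysets", "mint_pubkeys", "mint_quotes", "melt_quotes",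
     "promises", "proofs_used", "proofs_pending", "balance_log"]
def pvRank : PySem.Dict String Int := PySem.Dict.ofList ((PySem.List.enumerate pvNames).map (fun p => (p.2, p.1)))
def pvRk (t : String) : Int := pvRank.getD t 8
theorem pvRk_eq (t : String) : pvRk t =
    (if "keysets" = t then 0 else if "mint_pubkeys" = t then 1 else if "mint_quotes" = t then 2
     else if "melt_quotes" = t then 3 else if "promises" = t then 4 else if "proofs_used" = t then 5
     else if "proofs_pending" = t then 6 else if "balance_log" = t then 7 else 8 : Int) := by
  have h : pvRank = PySem.Dict.mk [("keysets",0),("mint_pubkeys",1),("mint_quotes",2),("melt_quotes",3),("promises",4),("proofs_used",5),("proofs_pending",6),("balance_log",7)] := by decide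
  rw [pvRk, h]
  simp only [PySem.Dict.getD_eq_get?_getD, PySem.Dict.get?_mk_cons, beq_iff_eq,
    apply_ite (fun o => Option.getD o (8:Int))]
  have he : (PySem.Dict.mk ([] : List (String × Int))).get? t = none := rfl
  simp [he]

theorem pvRk_bounds (t : String) : 0 ≤ pvRk t ∧ pvRk t ≤ 8 := by
  rw [pvRk_eq]; split_ifs <;> norm_num

def pvC (p : String × String) : Bool := p.2 == "table" && !(p.1 == "dbversions")

def pvStep (bs : List (List String)) (p : String × String) : List (List String) :=
  if pvC p then PySem.List.pySetD bs (pvRk p.1) (PySem.List.pyGetD bs (pvRk p.1) [] ++ [p.1]) else bs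

def pvSel (l : List (String × String)) (j : Int) : List String :=
  ((l.filter pvC).map Prod.fst).filter (fun t => pvRk t == j)

theorem pvFold (l : List (String × String)) : ∀ (bs : List (List String)), bs.length = 9 →
    l.foldl pvStep bs = (List.range 9).map (fun j => bs.getD j [] ++ pvSel l (j : Int)) := by
  induction l with
  | nil =>
    intro bs h
    simp only [List.foldl_nil, pvSel, List.filter_nil, List.map_nil, List.append_nil]
    apply List.ext_getElem (by simp [h])
    intro i h1 h2
    simp only [List.getElem_map, List.getElem_range]
    rw [List.getD_eq_getElem _ _ (by omega)]
  | cons p l ih =>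
    intro bs h
    rw [List.foldl_cons]
    by_cases hc : pvC p
    · have hb := pvRk_bounds p.1
      have h0 : 0 ≤ pvRk p.1 := hb.1
      have hlt : pvRk p.1 < (bs.length : Int) := by omega
      have hk : (pvRk p.1).toNat < bs.length := by omega
      have hset : pvStep bs p = bs.set (pvRk p.1).toNat
          (bs.getD (pvRk p.1).toNat [] ++ [p.1]) := by
        simp [pvStep, hc, PySem.List.pySetD, PySem.List.pySet?, PySem.List.pyIdx?, h0, hlt,
          PySem.List.pyGetD, PySem.List.pyGet?, List.getD_eq_getElem?_getD]
      rw [hset, ih _ (by simp [h])]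
      apply List.map_congr_left
      intro j hj
      rw [List.mem_range] at hj
      have hsel : pvSel (p :: l) (j : Int) =
          (if pvRk p.1 == (j : Int) then [p.1] else []) ++ pvSel l (j : Int) := by
        simp only [pvSel, List.filter_cons, hc, if_true, List.map_cons, List.filter_cons]
        split <;> simp
      rw [hsel]
      rw [List.getD_eq_getElem?_getD, List.getD_eq_getElem?_getD, List.getElem?_set]
      by_cases hjk : (pvRk p.1).toNat = j
      · have hbeq : (pvRk p.1 == (j : Int)) = true := by simp; omega
        rw [if_pos hjk, if_pos (by omega), hbeq]
        simp [List.getD_eq_getElem?_getD, hjk, List.append_assoc]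
      · have hbeq : (pvRk p.1 == (j : Int)) = false := by simp; omega
        rw [if_neg hjk, hbeq]
        simp
    · have hstep : pvStep bs p = bs := by simp [pvStep, hc]
      rw [hstep, ih _ h]
      apply List.map_congr_left
      intro j hj
      have hsel : pvSel (p :: l) (j : Int) = pvSel l (j : Int) := by
        simp [pvSel, hc]
      rw [hsel]

theorem pvRk_n0 (t : String) : pvRk t = 0 ↔ t = "keysets" := by
  rw [pvRk_eq]; split_ifs <;> simp_all [eq_comm]

theorem pvRk_n1 (t : String) : pvRk t = 1 ↔ t = "mint_pubkeys" := by
  rw [pvRk_eq]; split_ifs <;> simp_all [eq_comm]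

theorem pvRk_n2 (t : String) : pvRk t = 2 ↔ t = "mint_quotes" := by
  rw [pvRk_eq]; split_ifs <;> simp_all [eq_comm]

theorem pvRk_n3 (t : String) : pvRk t = 3 ↔ t = "melt_quotes" := by
  rw [pvRk_eq]; split_ifs <;> simp_all [eq_comm]

theorem pvRk_n4 (t : String) : pvRk t = 4 ↔ t = "promises" := by
  rw [pvRk_eq]; split_ifs <;> simp_all [eq_comm]

theorem pvRk_n5 (t : String) : pvRk t = 5 ↔ t = "proofs_used" := by
  rw [pvRk_eq]; split_ifs <;> simp_all [eq_comm]

theorem pvRk_n6 (t : String) : pvRk t = 6 ↔ t = "proofs_pending" := by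
  rw [pvRk_eq]; split_ifs <;> simp_all [eq_comm]

theorem pvRk_n7 (t : String) : pvRk t = 7 ↔ t = "balance_log" := by
  rw [pvRk_eq]; split_ifs <;> simp_all [eq_comm]

theorem pvRk_eight (t : String) : pvRk t = 8 ↔ ¬ t ∈ pvNames := by
  rw [pvRk_eq]; split_ifs <;> simp_all [pvNames, eq_comm]

theorem pvCands_nodup (l : List (String × String)) (hnd : (l.map Prod.fst).Nodup) :
    ((l.filter pvC).map Prod.fst).Nodup :=
  hnd.sublist ((List.filter_sublist (p := pvC)).map Prod.fst)

theorem pvMem_cands (l : List (String × String)) (name : String) (hdb : name ≠ "dbversions") :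
    name ∈ (l.filter pvC).map Prod.fst ↔ (name, "table") ∈ l := by
  simp only [List.mem_map, List.mem_filter]
  constructor
  · rintro ⟨p, ⟨hp, hc⟩, rfl⟩
    have : p.2 = "table" := by
      simp [pvC] at hc; exact hc.1
    simpa [← this]
  · intro hm
    exact ⟨(name, "table"), ⟨hm, by simp [pvC, hdb]⟩, rfl⟩

theorem pvSel_name (l : List (String × String)) (hnd : (l.map Prod.fst).Nodup)
    (name : String) (j : Int) (hj : ∀ t, pvRk t = j ↔ t = name) (hdb : name ≠ "dbversions") :
    pvSel l j = if (name, "table") ∈ l then [name] else [] := by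
  have hfe : (fun t => pvRk t == j) = (fun t => t == name) := by
    funext t; simp [hj t]
  rw [pvSel, hfe, List.filter_beq]
  by_cases hm : name ∈ (l.filter pvC).map Prod.fst
  · rw [List.count_eq_one_of_mem (pvCands_nodup l hnd) hm,
      if_pos ((pvMem_cands l name hdb).1 hm)]
    simp
  · rw [List.count_eq_zero.2 hm, if_neg (fun h => hm ((pvMem_cands l name hdb).2 h))]
    simp

theorem pvGet_of_mem (d : PySem.Dict String String) (hnd : d.keys.Nodup)
    (p : String × String) (hm : p ∈ d.items) (ht : p.2 = "table") :
    d.get? p.1 = some "table" := by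
  have hmem : (p.1, "table") ∈ d.items := by rw [← ht]; exact hm
  exact (PySem.Dict.get?_eq_some_iff_mem_items d p.1 "table" hnd).2 hmem

theorem pvSel_rest (d : PySem.Dict String String) (hnd : d.keys.Nodup) :
    pvSel d.items 8 =
      (d.items.filter (fun p => p.2 == "table" &&
        !((pvNames.filter (fun t => d.contains t && (d.get? t == some "table"))).contains p.1) &&
        !(p.1 == "dbversions"))).map (fun p => p.1) := by
  rw [pvSel, List.filter_map, List.filter_filter]
  apply congrArg (List.map _)
  apply List.filter_congr
  intro p hm
  by_cases ht : p.2 = "table"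
  · by_cases hd : p.1 = "dbversions"
    · simp [pvC, ht, hd]
    · have hget := pvGet_of_mem d hnd p hm ht
      have hcon : d.contains p.1 = true := by
        rw [PySem.Dict.contains_eq_isSome_get?, hget]; rfl
      rw [Bool.eq_iff_iff]
      simp [pvC, Function.comp, ht, hd, pvRk_eight, hget, hcon, List.mem_filter]
  · have hf : (p.2 == "table") = false := by simp [ht]
    simp [pvC, hf]

theorem main_eq (existing : List (String × String)) :
    ordered_tables_py existing = ordered_tables_py_alt existing := by
  set d := PySem.Dict.ofList existing with hd
  have hnd : d.keys.Nodup := PySem.Dict.nodup_keys_ofList existing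
  have hndf : (d.items.map Prod.fst).Nodup := by simpa [PySem.Dict.keys] using hnd
  have hB : ordered_tables_py_alt existing =
      ((List.range 9).map (fun j : Nat => pvSel d.items (j : Int))).foldl (fun o b => o ++ b) [] := by
    show ((d.items.foldl pvStep
        ((PySem.List.pyRange 0 (((8:Nat) : Int) + 1) 1).map (fun _ => ([] : List String)))).foldl
        (fun o b => o ++ b) []) = _
    have hb0 : (PySem.List.pyRange 0 (((8:Nat) : Int) + 1) 1).map (fun _ => ([] : List String)) =
        [[],[],[],[],[],[],[],[],[]] := by decide
    rw [hb0, pvFold d.items _ (by decide)]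
    apply congrArg (fun l => List.foldl (fun o b => o ++ b) ([] : List String) l)
    apply List.map_congr_left
    intro j hj
    rw [List.mem_range] at hj
    interval_cases j <;> rfl
  have hA : ordered_tables_py existing =
      (pvNames.filter (fun t => d.contains t && (d.get? t == some "table"))) ++
      ((d.items.filter (fun p => p.2 == "table" &&
        !((pvNames.filter (fun t => d.contains t && (d.get? t == some "table"))).contains p.1) &&
        !(p.1 == "dbversions"))).map (fun p => p.1)) := rfl
  have hq : ∀ name : String, ((d.contains name && (d.get? name == some "table")) = true) ↔
      ((name, "table") ∈ d.items) := by
    intro name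
    rw [← PySem.Dict.get?_eq_some_iff_mem_items d name "table" hnd]
    simp [PySem.Dict.contains_eq_isSome_get?, Bool.and_eq_true, beq_iff_eq]
    intro h; rw [h]; rfl
  have hsplit : ∀ (p : String → Bool) (x : String) (xs : List String),
      List.filter p (x :: xs) = (if p x then [x] else []) ++ List.filter p xs := by
    intro p x xs; by_cases h : p x <;> simp [h]
  have hfilter : pvNames.filter (fun t => d.contains t && (d.get? t == some "table")) =
      pvSel d.items 0 ++ pvSel d.items 1 ++ pvSel d.items 2 ++ pvSel d.items 3 ++
      pvSel d.items 4 ++ pvSel d.items 5 ++ pvSel d.items 6 ++ pvSel d.items 7 := by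
    rw [pvSel_name d.items hndf "keysets" 0 pvRk_n0 (by decide),
        pvSel_name d.items hndf "mint_pubkeys" 1 pvRk_n1 (by decide),
        pvSel_name d.items hndf "mint_quotes" 2 pvRk_n2 (by decide),
        pvSel_name d.items hndf "melt_quotes" 3 pvRk_n3 (by decide),
        pvSel_name d.items hndf "promises" 4 pvRk_n4 (by decide),
        pvSel_name d.items hndf "proofs_used" 5 pvRk_n5 (by decide),
        pvSel_name d.items hndf "proofs_pending" 6 pvRk_n6 (by decide),
        pvSel_name d.items hndf "balance_log" 7 pvRk_n7 (by decide)]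
    simp only [pvNames, hsplit, List.filter_nil, List.append_nil, hq]
    simp [List.append_assoc]
  rw [hA, hB, ← pvSel_rest d hnd, PySem.List.foldl_append_eq_flatten]
  have hrange : List.range 9 = [0,1,2,3,4,5,6,7,8] := by decide
  rw [hrange]
  simp only [List.map_cons, List.flatten_cons, List.nil_append, Nat.cast_ofNat,
    Nat.cast_zero, Nat.cast_one]
  rw [hfilter]
  simp [List.append_assoc]

-- ===== VERDICT (by name: the statement is the Claim_ definition above) =====
theorem ordered_tables_py_spec : Claim_equal_ordered_tables_py := by
  intro existing _
  exact main_eq existing
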